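-- pv_equiv track=rewrite | github.com/tkdebnath/simple-upgrade | src/simple_upgrade/manufacturers/juniper/distribution.py | _check_copy_success
-- ===== SOURCE A (Python) =====
-- def _check_copy_success(output: str) -> bool:
--     """Check if the copy command was successful."""
--     if isinstance(output, list):
--         output = '\n'.join(output)
--
--     success_indicators = [
--         'download complete',
--         'transfer complete',
--         'success',
--         'reboot scheduled',
--     ]
--
--     for indicator in success_indicators:
--         if indicator.lower() in output.lower():
--             return True
--
--     return False
-- ===== SOURCE B (Python) =====
-- def _check_copy_success(output: str) -> bool:
--     """Check if the copy command was successful."""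
--     if isinstance(output, list):
--         output = '\n'.join(output)
--
--     indicators = ('download complete', 'transfer complete', 'success', 'reboot scheduled')
--
--     text = output.lower()
--     # single left-to-right scan: at each position, try to match any indicator
--     for i in range(len(text)):
--         for ind in indicators:
--             if text.startswith(ind, i):
--                 return True
--     return False
-- ===== Notes on version B (the rewrite author's own statement) =====
-- stated objective: alternative
-- what changed: B replaces A's four independent substring scans (one 'in' test per indicator over the whole text) with one left-to-right scan over the lowered text that tries to match any indicator at each position.
import Mathlib
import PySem

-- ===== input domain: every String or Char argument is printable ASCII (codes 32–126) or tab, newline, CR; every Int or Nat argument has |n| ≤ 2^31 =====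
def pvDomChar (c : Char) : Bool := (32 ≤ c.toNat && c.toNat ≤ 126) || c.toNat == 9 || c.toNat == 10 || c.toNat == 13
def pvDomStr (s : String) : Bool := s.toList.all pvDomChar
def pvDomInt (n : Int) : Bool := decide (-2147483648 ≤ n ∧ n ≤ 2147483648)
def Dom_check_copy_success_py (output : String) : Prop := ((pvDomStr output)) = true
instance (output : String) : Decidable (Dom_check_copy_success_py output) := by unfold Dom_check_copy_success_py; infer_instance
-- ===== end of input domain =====

-- B scans the lowered text once left to right, trying every indicator at each position, instead of A's four whole-text substring tests; same result, alternative traversal.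

-- ===== PORT A =====
def check_copy_success_py (output : String) : Bool :=
  let indicators : List String :=
    ["download complete", "transfer complete", "success", "reboot scheduled"]
  -- 'for indicator in …: if indicator.lower() in output.lower(): return True' / 'return False'
  indicators.any (fun ind => PySem.Str.isIn (PySem.Str.lower ind) (PySem.Str.lower output))

-- ===== PORT B =====
def pvIndicators : List (List Char) :=
  ["download complete".toList, "transfer complete".toList, "success".toList, "reboot scheduled".toList]

-- 'for i in range(len(text)): for ind in indicators: if text.startswith(ind, i): return True'
def pvScan : List Char → Bool
  | [] => false
  | c :: rest => pvIndicators.any (fun ind => ind.isPrefixOf (c :: rest)) || pvScan rest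

def check_copy_success_py_alt (output : String) : Bool :=
  pvScan (PySem.Chars.lower output.toList)

-- ===== PRECONDITION & SPEC =====
def Spec_check_copy_success_py (output : String) (out : Bool) : Prop := out = check_copy_success_py_alt output
instance (output : String) (out : Bool) : Decidable (Spec_check_copy_success_py output out) := by unfold Spec_check_copy_success_py; infer_instance

-- ===== CLAIM (what is proved, stated in full; the proofs are below) =====
def Claim_equal_check_copy_success_py : Prop := ∀ (output : String), Dom_check_copy_success_py output → Spec_check_copy_success_py output (check_copy_success_py output)

-- ===== LEMMAS AND PROOFS =====

lemma pvScan_iff (t : List Char) :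
    pvScan t = true ↔ ∃ ind ∈ pvIndicators, ind <:+: t := by
  induction t with
  | nil =>
      simp only [pvScan, Bool.false_eq_true, false_iff]
      rintro ⟨ind, hmem, hinf⟩
      have : ind = [] := List.eq_nil_of_infix_nil hinf
      subst this
      revert hmem; decide
  | cons c rest ih =>
      simp only [pvScan, Bool.or_eq_true, List.any_eq_true, ih]
      constructor
      · rintro (⟨ind, hmem, hpre⟩ | ⟨ind, hmem, hinf⟩)
        · exact ⟨ind, hmem, (List.isPrefixOf_iff_prefix.mp hpre).isInfix⟩
        · exact ⟨ind, hmem, List.infix_cons hinf⟩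
      · rintro ⟨ind, hmem, hinf⟩
        rcases List.infix_cons_iff.mp hinf with hpre | hinf'
        · exact Or.inl ⟨ind, hmem, List.isPrefixOf_iff_prefix.mpr hpre⟩
        · exact Or.inr ⟨ind, hmem, hinf'⟩

lemma checkA_iff (output : String) :
    check_copy_success_py output = true ↔
      ∃ ind ∈ pvIndicators, ind <:+: PySem.Chars.lower output.toList := by
  simp only [check_copy_success_py, List.any_eq_true]
  constructor
  · rintro ⟨ind, hmem, h⟩
    fin_cases hmem <;>
      [exact ⟨"download complete".toList, by decide, by
          simpa using (PySem.Chars.isIn_iff_infix _ _).mp (by simpa using h)⟩;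
       exact ⟨"transfer complete".toList, by decide, by
          simpa using (PySem.Chars.isIn_iff_infix _ _).mp (by simpa using h)⟩;
       exact ⟨"success".toList, by decide, by
          simpa using (PySem.Chars.isIn_iff_infix _ _).mp (by simpa using h)⟩;
       exact ⟨"reboot scheduled".toList, by decide, by
          simpa using (PySem.Chars.isIn_iff_infix _ _).mp (by simpa using h)⟩]
  · rintro ⟨ind, hmem, h⟩
    fin_cases hmem <;>
      [exact ⟨"download complete", by decide, by
          simpa using (PySem.Chars.isIn_iff_infix _ _).mpr (by simpa using h)⟩;
       exact ⟨"transfer complete", by decide, by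
          simpa using (PySem.Chars.isIn_iff_infix _ _).mpr (by simpa using h)⟩;
       exact ⟨"success", by decide, by
          simpa using (PySem.Chars.isIn_iff_infix _ _).mpr (by simpa using h)⟩;
       exact ⟨"reboot scheduled", by decide, by
          simpa using (PySem.Chars.isIn_iff_infix _ _).mpr (by simpa using h)⟩]

-- ===== VERDICT (by name: the statement is the Claim_ definition above) =====
theorem check_copy_success_py_spec : Claim_equal_check_copy_success_py := by
  intro output _
  unfold Spec_check_copy_success_py check_copy_success_py_alt
  rw [Bool.eq_iff_iff, checkA_iff, pvScan_iff]
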